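-- pv_equiv track=rewrite | github.com/pypi-data/pypi-mirror-398 | packages/upcast/upcast-1.0.0-py3-none-any.whl/upcast/prometheus_metrics_scanner/ast_utils.py | _match_metric_pattern
-- ===== SOURCE A (Python) =====
-- from typing import Optional
--
-- def _match_metric_pattern(func_str: str) -> Optional[str]:
--     """Match function string against known metric patterns.
--
--     Args:
--         func_str: Function string to match
--
--     Returns:
--         Metric type or None
--     """
--     # Only match prometheus_client module patterns
--     metric_patterns = {
--         "prometheus_client.Counter": "counter",
--         "prometheus_client.Gauge": "gauge",
--         "prometheus_client.Histogram": "histogram",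
--         "prometheus_client.Summary": "summary",
--     }
--
--     for pattern, metric_type in metric_patterns.items():
--         if func_str == pattern or (func_str.endswith("." + pattern.split(".")[-1]) and "prometheus_client" in func_str):
--             return metric_type
--
--     return None
-- ===== SOURCE B (Python) =====
-- def _match_metric_pattern(func_str):
--     """Match function string against known metric patterns."""
--     if "prometheus_client" not in func_str:
--         return None
--     name = func_str.rsplit(".", 1)[-1]
--     return {"Counter": "counter", "Gauge": "gauge",
--             "Histogram": "histogram", "Summary": "summary"}.get(name)
-- ===== Notes on version B (the rewrite author's own statement) =====
-- stated objective: simpler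
-- what changed: Replaces the four-pattern scan (each iteration doing an equality test plus an endswith/contains check) by one module-name substring guard, extraction of the last dot-separated component, and a single dict lookup; the equality branch of A is subsumed by its endswith branch.
import Mathlib
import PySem

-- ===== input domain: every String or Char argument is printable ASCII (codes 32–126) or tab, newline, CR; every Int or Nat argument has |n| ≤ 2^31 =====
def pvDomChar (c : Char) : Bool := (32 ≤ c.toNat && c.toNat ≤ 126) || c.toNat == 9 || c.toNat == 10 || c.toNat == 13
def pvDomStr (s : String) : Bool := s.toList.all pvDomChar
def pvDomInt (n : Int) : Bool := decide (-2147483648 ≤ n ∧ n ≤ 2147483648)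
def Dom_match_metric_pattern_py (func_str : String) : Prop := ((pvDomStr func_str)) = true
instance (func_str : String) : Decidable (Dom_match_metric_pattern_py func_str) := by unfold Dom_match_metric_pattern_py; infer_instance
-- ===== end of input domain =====

-- B replaces A's four-pattern scan by one substring guard plus a last-component dict lookup (simpler, not claimed faster).


-- ===== PORT A =====
-- the loop over metric_patterns.items(); pattern.split(".")[-1] is ported literally:
-- split? with sep "." is always `some` and [-1] on its non-empty result via pyGet?, so the getD defaults are never reached
def matchLoopA : List (String × String) → String → Option String
  | [], _ => none
  | (pattern, metric_type) :: rest, func_str =>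
    if func_str == pattern
        || (PySem.Str.endswith func_str
              ("." ++ (PySem.List.pyGet? ((PySem.Str.split? pattern ".").getD []) (-1)).getD "")
            && PySem.Str.isIn "prometheus_client" func_str) then
      some metric_type
    else matchLoopA rest func_str

def match_metric_pattern_py (func_str : String) : Option String :=
  matchLoopA
    [("prometheus_client.Counter", "counter"),
     ("prometheus_client.Gauge", "gauge"),
     ("prometheus_client.Histogram", "histogram"),
     ("prometheus_client.Summary", "summary")]
    func_str

-- ===== PORT B =====
-- func_str.rsplit(".", 1)[-1]: the part after the last '.' (the whole string if there is no '.') — exact for this use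
def lastComponent (cs : List Char) : List Char :=
  (cs.reverse.takeWhile (fun c => c != '.')).reverse

def match_metric_pattern_py_alt (func_str : String) : Option String :=
  if PySem.Str.isIn "prometheus_client" func_str then
    PySem.Dict.get?
      (PySem.Dict.ofList
        [("Counter", "counter"), ("Gauge", "gauge"),
         ("Histogram", "histogram"), ("Summary", "summary")])
      (String.ofList (lastComponent func_str.toList))
  else none

-- ===== PRECONDITION & SPEC =====
def Spec_match_metric_pattern_py (func_str : String) (out : Option String) : Prop := out = match_metric_pattern_py_alt func_str
instance (func_str : String) (out : Option String) : Decidable (Spec_match_metric_pattern_py func_str out) := by unfold Spec_match_metric_pattern_py; infer_instance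

-- ===== CLAIM (what is proved, stated in full; the proofs are below) =====
def Claim_equal_match_metric_pattern_py : Prop := ∀ (func_str : String), Dom_match_metric_pattern_py func_str → Spec_match_metric_pattern_py func_str (match_metric_pattern_py func_str)

-- ===== LEMMAS AND PROOFS =====

-- A's loop, with the closed pattern manipulations evaluated
theorem A_chain (s : String) : match_metric_pattern_py s =
    (if s == "prometheus_client.Counter" || (PySem.Str.endswith s ".Counter" && PySem.Str.isIn "prometheus_client" s) then some "counter"
     else if s == "prometheus_client.Gauge" || (PySem.Str.endswith s ".Gauge" && PySem.Str.isIn "prometheus_client" s) then some "gauge"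
     else if s == "prometheus_client.Histogram" || (PySem.Str.endswith s ".Histogram" && PySem.Str.isIn "prometheus_client" s) then some "histogram"
     else if s == "prometheus_client.Summary" || (PySem.Str.endswith s ".Summary" && PySem.Str.isIn "prometheus_client" s) then some "summary"
     else none) := rfl

theorem dict_get (k : String) :
    PySem.Dict.get?
      (PySem.Dict.ofList
        [("Counter", "counter"), ("Gauge", "gauge"),
         ("Histogram", "histogram"), ("Summary", "summary")]) k =
    (if "Counter" == k then some "counter"
     else if "Gauge" == k then some "gauge"
     else if "Histogram" == k then some "histogram"
     else if "Summary" == k then some "summary"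
     else none) := by
  rw [show (PySem.Dict.ofList
        [("Counter", "counter"), ("Gauge", "gauge"),
         ("Histogram", "histogram"), ("Summary", "summary")] : PySem.Dict String String) =
      PySem.Dict.mk [("Counter", "counter"), ("Gauge", "gauge"),
         ("Histogram", "histogram"), ("Summary", "summary")] from rfl]
  simp only [PySem.Dict.get?_mk_cons]
  rfl

theorem B_chain (s : String) : match_metric_pattern_py_alt s =
    (if PySem.Str.isIn "prometheus_client" s then
       if "Counter" == String.ofList (lastComponent s.toList) then some "counter"
       else if "Gauge" == String.ofList (lastComponent s.toList) then some "gauge"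
       else if "Histogram" == String.ofList (lastComponent s.toList) then some "histogram"
       else if "Summary" == String.ofList (lastComponent s.toList) then some "summary"
       else none
     else none) := by
  unfold match_metric_pattern_py_alt
  rw [dict_get]

theorem ofList_eq_iff (l : List Char) (t : String) : String.ofList l = t ↔ l = t.toList := by
  constructor
  · rintro rfl; simp
  · rintro rfl; simp

-- a dot-free list followed by '.' is a prefix of R iff the maximal dot-free prefix of R is exactly it and R contains a dot
theorem takeWhile_dot : ∀ (R Y : List Char), ('.' : Char) ∉ Y →
    ((Y ++ ['.']) <+: R ↔ (R.takeWhile (fun c => c != '.') = Y ∧ ('.' : Char) ∈ R)) := by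
  intro R
  induction R with
  | nil =>
    intro Y hY
    constructor
    · rintro ⟨t, ht⟩
      exact absurd ht (by simp)
    · rintro ⟨-, h⟩; cases h
  | cons c R ih =>
    intro Y hY
    cases Y with
    | nil =>
      simp only [List.nil_append]
      constructor
      · intro h
        rcases List.cons_prefix_cons.mp h with ⟨hcd, -⟩
        refine ⟨?_, ?_⟩
        · rw [List.takeWhile_cons]; simp [← hcd]
        · rw [← hcd]; exact List.mem_cons_self
      · rintro ⟨htw, hm⟩
        by_cases hc : c = '.'
        · subst hc; exact ⟨R, rfl⟩
        · exfalso
          rw [List.takeWhile_cons] at htw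
          simp [hc] at htw
    | cons y Y' =>
      have hy : y ≠ '.' := by intro h; exact hY (h ▸ List.mem_cons_self)
      have hY' : ('.' : Char) ∉ Y' := fun h => hY (List.mem_cons_of_mem _ h)
      constructor
      · intro h
        rw [List.cons_append] at h
        rcases List.cons_prefix_cons.mp h with ⟨hyc, htail⟩
        rcases (ih Y' hY').mp htail with ⟨htw, hm⟩
        subst hyc
        refine ⟨?_, List.mem_cons_of_mem _ hm⟩
        rw [List.takeWhile_cons]
        simp [hy, htw]
      · rintro ⟨htw, hm⟩
        by_cases hc : c = '.'
        · exfalso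
          rw [List.takeWhile_cons] at htw
          simp [hc] at htw
        · rw [List.takeWhile_cons] at htw
          simp only [bne_iff_ne, ne_eq, hc, not_false_eq_true, if_pos] at htw
          rcases List.cons_eq_cons.mp htw with ⟨hcy, htw'⟩
          have hm' : ('.' : Char) ∈ R := by
            rcases List.mem_cons.mp hm with h | h
            · exact absurd h.symm hc
            · exact h
          rw [List.cons_append]
          exact List.cons_prefix_cons.mpr ⟨hcy.symm, (ih Y' hY').mpr ⟨htw', hm'⟩⟩

theorem takeWhile_of_no_dot : ∀ (R : List Char), ('.' : Char) ∉ R →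
    R.takeWhile (fun c => c != '.') = R := by
  intro R
  induction R with
  | nil => intro _; rfl
  | cons c R ih =>
    intro h
    have hc : c ≠ '.' := by intro hc; exact h (hc ▸ List.mem_cons_self)
    rw [List.takeWhile_cons]
    simp only [bne_iff_ne, ne_eq, hc, not_false_eq_true, if_pos]
    rw [ih (fun hm => h (List.mem_cons_of_mem _ hm))]

theorem lastComp_iff (L X : List Char) (hX : ('.' : Char) ∉ X) (hne : L ≠ X) :
    (PySem.Chars.endswith L ('.' :: X) = true ↔ lastComponent L = X) := by
  rw [PySem.Chars.endswith_iff L ('.' :: X), ← List.reverse_prefix,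
      show ('.' :: X).reverse = X.reverse ++ ['.'] from by simp,
      takeWhile_dot L.reverse X.reverse (by simpa using hX)]
  constructor
  · rintro ⟨htw, -⟩
    simp [lastComponent, htw]
  · intro h
    have htw : L.reverse.takeWhile (fun c => c != '.') = X.reverse := by
      have := congrArg List.reverse h
      simpa [lastComponent] using this
    refine ⟨htw, ?_⟩
    by_contra hdot
    apply hne
    have hrev : L.reverse = X.reverse := by
      rw [← takeWhile_of_no_dot L.reverse (by simpa using hdot), htw]
    exact List.reverse_injective hrev

-- for X a dot-free name not containing "prometheus_client", endswith("."+X) agrees with the last-component test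
theorem branch_eq (s X dotX : String) (hdx : dotX.toList = '.' :: X.toList)
    (hX : ('.' : Char) ∉ X.toList)
    (hnot : PySem.Chars.isIn ("prometheus_client".toList) X.toList = false)
    (hin : PySem.Str.isIn "prometheus_client" s = true) :
    PySem.Str.endswith s dotX = (X == String.ofList (lastComponent s.toList)) := by
  have hne : s.toList ≠ X.toList := by
    intro h
    rw [PySem.Str.isIn_eq, h, hnot] at hin
    exact absurd hin (by simp)
  rw [Bool.eq_iff_iff, PySem.Str.endswith_eq, hdx,
      lastComp_iff s.toList X.toList hX hne, beq_iff_eq]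
  constructor
  · intro h; exact ((ofList_eq_iff _ _).mpr h).symm
  · intro h; exact (ofList_eq_iff _ _).mp h.symm

-- the equality branch is subsumed: the pattern itself ends with the suffix and contains "prometheus_client"
theorem absorb (s pat suf : String)
    (h1 : PySem.Str.endswith pat suf = true)
    (h2 : PySem.Str.isIn "prometheus_client" pat = true) :
    (s == pat || (PySem.Str.endswith s suf && PySem.Str.isIn "prometheus_client" s)) =
    (PySem.Str.endswith s suf && PySem.Str.isIn "prometheus_client" s) := by
  cases h : (s == pat)
  · rw [Bool.false_or]
  · have hs : s = pat := beq_iff_eq.mp h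
    subst hs
    rw [h1, h2]
    rfl

-- ===== VERDICT (by name: the statement is the Claim_ definition above) =====
theorem match_metric_pattern_py_spec : Claim_equal_match_metric_pattern_py := by
  intro s _
  unfold Spec_match_metric_pattern_py
  rw [A_chain s, B_chain s]
  by_cases hin : PySem.Str.isIn "prometheus_client" s = true
  · rw [absorb s "prometheus_client.Counter" ".Counter" (by decide) (by decide),
        absorb s "prometheus_client.Gauge" ".Gauge" (by decide) (by decide),
        absorb s "prometheus_client.Histogram" ".Histogram" (by decide) (by decide),
        absorb s "prometheus_client.Summary" ".Summary" (by decide) (by decide),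
        branch_eq s "Counter" ".Counter" (by decide) (by decide) (by decide) hin,
        branch_eq s "Gauge" ".Gauge" (by decide) (by decide) (by decide) hin,
        branch_eq s "Histogram" ".Histogram" (by decide) (by decide) (by decide) hin,
        branch_eq s "Summary" ".Summary" (by decide) (by decide) (by decide) hin]
    simp only [hin, Bool.and_true, if_true]
  · have hin' : PySem.Str.isIn "prometheus_client" s = false := by
      cases h : PySem.Str.isIn "prometheus_client" s
      · rfl
      · exact absurd h hin
    have h1 : (s == "prometheus_client.Counter") = false := by
      cases h : (s == "prometheus_client.Counter")
      · rfl
      · have hs := beq_iff_eq.mp h; subst hs; exact absurd (by decide) hin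
    have h2 : (s == "prometheus_client.Gauge") = false := by
      cases h : (s == "prometheus_client.Gauge")
      · rfl
      · have hs := beq_iff_eq.mp h; subst hs; exact absurd (by decide) hin
    have h3 : (s == "prometheus_client.Histogram") = false := by
      cases h : (s == "prometheus_client.Histogram")
      · rfl
      · have hs := beq_iff_eq.mp h; subst hs; exact absurd (by decide) hin
    have h4 : (s == "prometheus_client.Summary") = false := by
      cases h : (s == "prometheus_client.Summary")
      · rfl
      · have hs := beq_iff_eq.mp h; subst hs; exact absurd (by decide) hin
    simp only [hin', h1, h2, h3, h4, Bool.and_false, Bool.false_or, if_false, Bool.false_eq_true]
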